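-- pv_equiv track=rewrite | github.com/diana-okrut/by_nesusvet | easy-alphabet-war 2.0.py | determination_of_winners
-- ===== SOURCE A (Python) =====
-- left_side = {'s': 1,
--              'b': 2,
--              'p': 3,
--              'w': 4,
--              'y': 1,
--              }
--
-- right_side = {'z': 1,
--               'd': 2,
--               'q': 3,
--               'm': 4,
--               'y': 3,
--               }
--
-- central = {'a': 1,
--            'o': 1,
--            'u': 1,
--            'e': 1,
--            'i': 1,
--            'y': 1,
--            }
--
-- def counting_of_points(battlefield: str, army: dict):
--     counter = 0
--     for letter in battlefield:
--         if letter in army: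
--             counter += army[letter]
--     return counter
--
-- def determination_of_winners(text):
--     if text == '':
--         return "Let's fight again!"
--
--     left_side_points = counting_of_points(text, left_side)
--     right_side_points = counting_of_points(text, right_side)
--     central_points = counting_of_points(text, central)
--
--     results = {'Left side': left_side_points,
--                'Right side': right_side_points,
--                'Central': central_points,
--                }
--     pairs = []
--     for name, score in results.items():
--         pairs.append((score, name))
--     winners_list = sorted(pairs, reverse=True)
--     first_place = winners_list[0]
--     second_place = winners_list[1]
--     if first_place[0] == second_place[0]:
--         answer = "Let's fight again!"
--     else:
--         answer = f'{first_place[1]} wins!'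
--     return answer
-- ===== SOURCE B (Python) =====
-- left_side = {'s': 1, 'b': 2, 'p': 3, 'w': 4, 'y': 1}
-- right_side = {'z': 1, 'd': 2, 'q': 3, 'm': 4, 'y': 3}
-- central = {'a': 1, 'o': 1, 'u': 1, 'e': 1, 'i': 1, 'y': 1}
--
-- def determination_of_winners(text):
--     l = r = c = 0
--     for ch in text:
--         l += left_side.get(ch, 0)
--         r += right_side.get(ch, 0)
--         c += central.get(ch, 0)
--     if l > r and l > c:
--         return 'Left side wins!'
--     if r > l and r > c:
--         return 'Right side wins!'
--     if c > l and c > r: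
--         return 'Central wins!'
--     return "Let's fight again!"
-- ===== Notes on version B (the rewrite author's own statement) =====
-- stated objective: simpler
-- what changed: B makes a single pass over the text accumulating the three armies' totals at once and picks the winner with a strict-max comparison, instead of A's three full scans, dict-to-pair-list build, and reverse sort.
import Mathlib
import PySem

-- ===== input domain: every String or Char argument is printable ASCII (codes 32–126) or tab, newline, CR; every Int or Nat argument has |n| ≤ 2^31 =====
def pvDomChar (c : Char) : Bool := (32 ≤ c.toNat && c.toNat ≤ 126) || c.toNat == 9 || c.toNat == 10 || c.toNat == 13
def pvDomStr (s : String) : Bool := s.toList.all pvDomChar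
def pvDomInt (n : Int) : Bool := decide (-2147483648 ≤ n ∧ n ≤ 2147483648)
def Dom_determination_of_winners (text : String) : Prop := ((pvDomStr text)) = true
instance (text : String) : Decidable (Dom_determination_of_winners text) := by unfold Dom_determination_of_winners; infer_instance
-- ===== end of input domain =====

-- B replaces A's three full scans plus building and sorting (score, name) pairs by a
-- single pass accumulating the three totals and a strict-max comparison (objective: simpler).

-- ===== PORT A =====
def left_side : PySem.Dict Char Int :=
  PySem.Dict.ofList [('s', 1), ('b', 2), ('p', 3), ('w', 4), ('y', 1)]

def right_side : PySem.Dict Char Int :=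
  PySem.Dict.ofList [('z', 1), ('d', 2), ('q', 3), ('m', 4), ('y', 3)]

def central : PySem.Dict Char Int :=
  PySem.Dict.ofList [('a', 1), ('o', 1), ('u', 1), ('e', 1), ('i', 1), ('y', 1)]

def counting_of_points (battlefield : String) (army : PySem.Dict Char Int) : Int :=
  battlefield.toList.foldl
    (fun counter letter =>
      if army.contains letter then counter + army.getD letter 0 else counter) 0

def determination_of_winners (text : String) : String :=
  if text == "" then "Let's fight again!"
  else
    let left_side_points := counting_of_points text left_side
    let right_side_points := counting_of_points text right_side
    let central_points := counting_of_points text central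
    let results : PySem.Dict String Int :=
      ((PySem.Dict.empty.insert "Left side" left_side_points).insert
          "Right side" right_side_points).insert "Central" central_points
    let pairs := results.items.foldl
      (fun acc p => acc ++ [(p.2, p.1)]) ([] : List (Int × String))
    let winners_list := PySem.List.sorted2 pairs Prod.fst Prod.snd true
    let first_place := PySem.List.pyGetD winners_list 0 (0, "")
    let second_place := PySem.List.pyGetD winners_list 1 (0, "")
    if first_place.1 == second_place.1 then "Let's fight again!"
    else first_place.2 ++ " wins!"

-- ===== PORT B =====
def left_side_b : PySem.Dict Char Int :=
  PySem.Dict.ofList [('s', 1), ('b', 2), ('p', 3), ('w', 4), ('y', 1)]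

def right_side_b : PySem.Dict Char Int :=
  PySem.Dict.ofList [('z', 1), ('d', 2), ('q', 3), ('m', 4), ('y', 3)]

def central_b : PySem.Dict Char Int :=
  PySem.Dict.ofList [('a', 1), ('o', 1), ('u', 1), ('e', 1), ('i', 1), ('y', 1)]

def determination_of_winners_alt (text : String) : String :=
  let t := text.toList.foldl
    (fun (acc : Int × Int × Int) ch =>
      (acc.1 + left_side_b.getD ch 0,
       acc.2.1 + right_side_b.getD ch 0,
       acc.2.2 + central_b.getD ch 0)) (0, 0, 0)
  if t.1 > t.2.1 ∧ t.1 > t.2.2 then "Left side wins!"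
  else if t.2.1 > t.1 ∧ t.2.1 > t.2.2 then "Right side wins!"
  else if t.2.2 > t.1 ∧ t.2.2 > t.2.1 then "Central wins!"
  else "Let's fight again!"

-- ===== PRECONDITION & SPEC =====
def Spec_determination_of_winners (text : String) (out : String) : Prop := out = determination_of_winners_alt text
instance (text : String) (out : String) : Decidable (Spec_determination_of_winners text out) := by unfold Spec_determination_of_winners; infer_instance

-- ===== CLAIM (what is proved, stated in full; the proofs are below) =====
def Claim_equal_determination_of_winners : Prop := ∀ (text : String), Dom_determination_of_winners text → Spec_determination_of_winners text (determination_of_winners text)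

-- ===== LEMMAS AND PROOFS =====

-- A's guarded accumulation step equals plain addition of getD (default 0).
theorem step_eq (d : PySem.Dict Char Int) (k : Int) (ch : Char) :
    (if d.contains ch then k + d.getD ch 0 else k) = k + d.getD ch 0 := by
  by_cases h : d.contains ch
  · simp [h]
  · have h' : d.contains ch = false := by simpa using h
    simp [h', PySem.Dict.getD_of_not_contains]

-- An additive fold started at a equals a plus the fold started at 0.
theorem add_shift (f : Char → Int) (cs : List Char) (a : Int) :
    cs.foldl (fun k ch => k + f ch) a = a + cs.foldl (fun k ch => k + f ch) 0 := by
  induction cs generalizing a with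
  | nil => simp
  | cons ch cs ih =>
    simp only [List.foldl_cons]
    rw [ih (a + f ch), ih (0 + f ch)]
    ring

-- B's single fold over the text computes the three per-army sums at once.
theorem fold_split (cs : List Char) (l r c : Int) :
    cs.foldl (fun (acc : Int × Int × Int) ch =>
      (acc.1 + left_side_b.getD ch 0,
       acc.2.1 + right_side_b.getD ch 0,
       acc.2.2 + central_b.getD ch 0)) (l, r, c)
    = (l + cs.foldl (fun k ch => k + left_side_b.getD ch 0) 0,
       r + cs.foldl (fun k ch => k + right_side_b.getD ch 0) 0,
       c + cs.foldl (fun k ch => k + central_b.getD ch 0) 0) := by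
  induction cs generalizing l r c with
  | nil => simp
  | cons ch cs ih =>
    simp only [List.foldl_cons, ih]
    refine Prod.ext ?_ (Prod.ext ?_ ?_)
    · simp only []
      rw [add_shift (fun ch => left_side_b.getD ch 0) cs (0 + left_side_b.getD ch 0)]
      ring
    · simp only []
      rw [add_shift (fun ch => right_side_b.getD ch 0) cs (0 + right_side_b.getD ch 0)]
      ring
    · simp only []
      rw [add_shift (fun ch => central_b.getD ch 0) cs (0 + central_b.getD ch 0)]
      ring

-- Python's `a < b or not b < a` on the first tuple component, as one decide.
theorem or_le (a b : Int) : (decide (a < b) || !decide (b < a)) = decide (a ≤ b) := by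
  by_cases h : a < b <;> by_cases h2 : b < a <;> simp [h, h2] <;> omega

-- A's items loop over the three-entry results dict yields the three (score, name) pairs.
theorem pairs_eq (lp rp cp : Int) :
    ((((PySem.Dict.empty.insert "Left side" lp).insert "Right side" rp).insert
        "Central" cp : PySem.Dict String Int)).items.foldl
      (fun acc p => acc ++ [(p.2, p.1)]) ([] : List (Int × String))
    = [(lp, "Left side"), (rp, "Right side"), (cp, "Central")] := rfl

-- A's sort-and-compare tail equals B's strict-max chain, for any three scores.
theorem decision (l r c : Int) :
    (let winners_list := PySem.List.sorted2
        [(l, "Left side"), (r, "Right side"), (c, "Central")] Prod.fst Prod.snd true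
     let first_place := PySem.List.pyGetD winners_list 0 ((0 : Int), "")
     let second_place := PySem.List.pyGetD winners_list 1 ((0 : Int), "")
     if first_place.1 == second_place.1 then "Let's fight again!"
     else first_place.2 ++ " wins!")
    = (if l > r ∧ l > c then "Left side wins!"
       else if r > l ∧ r > c then "Right side wins!"
       else if c > l ∧ c > r then "Central wins!"
       else "Let's fight again!") := by
  have hLR : decide ("Left side" < "Right side") = true :=
    decide_eq_true (String.lt_iff_toList_lt.mpr (by decide))
  have hLC : decide ("Left side" < "Central") = false :=
    decide_eq_false (fun h => by have := String.lt_iff_toList_lt.mp h; revert this; decide)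
  have hRC : decide ("Right side" < "Central") = false :=
    decide_eq_false (fun h => by have := String.lt_iff_toList_lt.mp h; revert this; decide)
  simp only [PySem.List.sorted2, List.foldl, PySem.List.insertBy, if_true,
    hLR, hLC, hRC, Bool.and_true, Bool.and_false, Bool.or_false, or_le, apply_ite
      (PySem.List.insertBy
        (fun a b => decide (b.1 < a.1) || !decide (a.1 < b.1) && decide (b.2 < a.2))
        ((c : Int), "Central"))]
  split_ifs <;>
    simp_all [PySem.List.pyGetD, PySem.List.pyGet?, PySem.List.pyIdx?, beq_iff_eq] <;>
    omega

-- ===== VERDICT (by name: the statement is the Claim_ definition above) =====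
theorem determination_of_winners_spec : Claim_equal_determination_of_winners := by
  intro text _
  unfold Spec_determination_of_winners determination_of_winners determination_of_winners_alt
  by_cases htext : text = ""
  · subst htext
    rfl
  · rw [if_neg (by simpa using htext)]
    rw [fold_split]
    simp only [counting_of_points, step_eq, pairs_eq]
    have hl : left_side_b = left_side := rfl
    have hr : right_side_b = right_side := rfl
    have hc : central_b = central := rfl
    rw [hl, hr, hc]
    simpa using decision
      (text.toList.foldl (fun k ch => k + left_side.getD ch 0) 0)
      (text.toList.foldl (fun k ch => k + right_side.getD ch 0) 0)
      (text.toList.foldl (fun k ch => k + central.getD ch 0) 0)
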